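-- pv_equiv track=rewrite | github.com/Lightning-AI/litgpt | lit_gpt/finetune/lora.py | get_max_seq_length
-- ===== SOURCE A (Python) =====
-- from typing import Optional, List, Dict, Tuple
--
-- override_max_seq_length = None
--
-- def get_max_seq_length(data: List[Dict]) -> Tuple[int, int, int]:
--     # find out the minimum max_seq_length required during fine-tuning (saves memory!)
--     lengths = [len(d["input_ids"]) for d in data]
--     max_seq_length = max(lengths)
--     longest_seq_ix = lengths.index(max_seq_length)
--     # support easy override at the top of the file
--     return (
--         override_max_seq_length if isinstance(override_max_seq_length, int) else max_seq_length,
--         max_seq_length,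
--         longest_seq_ix,
--     )
-- ===== SOURCE B (Python) =====
-- from typing import Optional, List, Dict, Tuple
--
-- override_max_seq_length = None
--
-- def get_max_seq_length(data: List[Dict]) -> Tuple[int, int, int]:
--     # one pass: track the largest length seen so far and its index (first max wins)
--     best = None
--     best_ix = 0
--     for i, d in enumerate(data):
--         n = len(d["input_ids"])
--         if best is None or n > best:
--             best, best_ix = n, i
--     if best is None:
--         raise ValueError("max() arg is an empty sequence")
--     return (
--         override_max_seq_length if isinstance(override_max_seq_length, int) else best,
--         best,
--         best_ix,
--     )
-- ===== Notes on version B (the rewrite author's own statement) =====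
-- stated objective: alternative
-- what changed: Replaces the three scans (build a lengths list, max(), .index()) by a single enumerate pass that tracks the running maximum and its first index, building no intermediate list.
import Mathlib
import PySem

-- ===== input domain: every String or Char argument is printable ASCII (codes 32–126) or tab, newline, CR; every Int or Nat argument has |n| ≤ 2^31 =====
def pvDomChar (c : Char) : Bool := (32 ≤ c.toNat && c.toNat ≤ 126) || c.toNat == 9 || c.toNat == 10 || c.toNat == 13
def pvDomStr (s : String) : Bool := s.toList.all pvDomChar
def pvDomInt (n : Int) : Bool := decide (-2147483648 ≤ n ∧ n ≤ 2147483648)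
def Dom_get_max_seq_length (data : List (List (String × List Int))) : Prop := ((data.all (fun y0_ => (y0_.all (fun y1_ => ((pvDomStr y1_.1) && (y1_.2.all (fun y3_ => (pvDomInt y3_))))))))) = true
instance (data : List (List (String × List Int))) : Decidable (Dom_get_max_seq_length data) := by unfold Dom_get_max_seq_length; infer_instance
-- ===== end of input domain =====

-- B replaces A's three scans (lengths list, max(), .index()) by one enumerate pass tracking the running max and its first index (objective: alternative).


-- ===== PORT A =====
-- len(d["input_ids"]); under Pre_ the key is present, so getD [] is never taken.
def pvLen (d : List (String × List Int)) : Int :=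
  (((PySem.Dict.get? ⟨d⟩ "input_ids").getD []).length : Int)

-- override_max_seq_length = None, so the isinstance(…, int) branch is never taken.
def get_max_seq_length (data : List (List (String × List Int))) : Int × Int × Int :=
  let lengths : List Int := data.map pvLen
  match PySem.List.max? lengths (fun x => x) with
  | none => (0, 0, 0)          -- Python raises ValueError here (empty data); excluded by Pre_
  | some m => (m, m, ((PySem.List.index? lengths m).getD 0 : Nat))

-- ===== PORT B =====
def pvStep (acc : Option Int × Int) (p : Int × List (String × List Int)) : Option Int × Int :=
  let n := pvLen p.2
  match acc.1 with
  | none => (some n, p.1)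
  | some b => if n > b then (some n, p.1) else acc

def get_max_seq_length_alt (data : List (List (String × List Int))) : Int × Int × Int :=
  let st := (PySem.List.enumerate data 0).foldl pvStep (none, 0)
  match st.1 with
  | none => (0, 0, 0)          -- Python raises ValueError here (empty data); excluded by Pre_
  | some b => (b, b, st.2)

-- ===== PRECONDITION & SPEC =====
-- Pre_ excludes exactly the inputs where Python A raises: empty data (ValueError from max([]))
-- and a dict without the "input_ids" key (KeyError).
def Pre_get_max_seq_length (data : List (List (String × List Int))) : Prop :=
  data ≠ [] ∧ data.all (fun d => (PySem.Dict.get? ⟨d⟩ "input_ids").isSome) = true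
instance (data : List (List (String × List Int))) : Decidable (Pre_get_max_seq_length data) := by
  unfold Pre_get_max_seq_length; infer_instance

def pvWitness_get_max_seq_length : (List (List (String × List Int))) :=
  [[("input_ids", [1, 2, 3])], [("input_ids", [4])]]

def Spec_get_max_seq_length (data : List (List (String × List Int))) (out : Int × Int × Int) : Prop := out = get_max_seq_length_alt data
instance (data : List (List (String × List Int))) (out : Int × Int × Int) : Decidable (Spec_get_max_seq_length data out) := by unfold Spec_get_max_seq_length; infer_instance

-- ===== CLAIM (what is proved, stated in full; the proofs are below) =====
def Claim_equal_get_max_seq_length : Prop := ∀ (data : List (List (String × List Int))), Dom_get_max_seq_length data → Pre_get_max_seq_length data → Spec_get_max_seq_length data (get_max_seq_length data)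

-- ===== LEMMAS AND PROOFS =====

-- Invariant of the one-pass loop: on nonempty data the fold computes the maximum of the
-- mapped lengths together with its first index.
theorem pvFold_spec (data : List (List (String × List Int))) (hne : data ≠ []) :
    ∃ (m : Int) (k : Nat),
      PySem.List.max? (data.map pvLen) (fun x => x) = some m ∧
      PySem.List.index? (data.map pvLen) m = some k ∧
      (PySem.List.enumerate data 0).foldl pvStep (none, 0) = (some m, (k : Int)) := by
  induction data using List.reverseRecOn with
  | nil => exact absurd rfl hne
  | append_singleton ls x ih =>
    rcases List.eq_nil_or_concat ls with h | _
    · subst h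
      exact ⟨pvLen x, 0, by simp [PySem.List.max?_id_cons],
        by simp [PySem.List.index?_eq_idxOf?, List.idxOf?],
        by simp [PySem.List.enumerate_cons, PySem.List.enumerate_nil, pvStep]⟩
    · have hls : ls ≠ [] := by rintro rfl; simp_all
      obtain ⟨m, k, hmax, hidx, hfold⟩ := ih hls
      have hmem : m ∈ ls.map pvLen := PySem.List.max?_mem hmax
      have hle : ∀ y ∈ ls.map pvLen, y ≤ m := fun y hy => PySem.List.max?_isMax hmax y hy
      -- max? of the extended list
      obtain ⟨h0, t, rfl⟩ : ∃ h0 t, ls = h0 :: t := by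
        cases ls with | nil => exact absurd rfl hls | cons a b => exact ⟨a, b, rfl⟩
      have hmax' : PySem.List.max? ((h0 :: t ++ [x]).map pvLen) (fun y => y)
          = some (max m (pvLen x)) := by
        have hm : m = (t.map pvLen).foldl max (pvLen h0) := by
          have := hmax
          rw [List.map_cons, PySem.List.max?_id_cons] at this
          exact (Option.some.inj this).symm
        simp [PySem.List.max?_id_cons, List.foldl_append, hm]
      have hfold' : (PySem.List.enumerate (h0 :: t ++ [x]) 0).foldl pvStep (none, 0)
          = pvStep (some m, (k : Int)) (((h0 :: t).length : Int), x) := by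
        rw [show (h0 :: t ++ [x]) = (h0 :: t) ++ [x] by simp,
            PySem.List.enumerate_append, List.foldl_append, hfold]
        simp [PySem.List.enumerate_cons, PySem.List.enumerate_nil]
      by_cases hgt : pvLen x > m
      · refine ⟨pvLen x, (h0 :: t).length, ?_, ?_, ?_⟩
        · rw [hmax']; congr 1; omega
        · have hnotin : pvLen x ∉ (h0 :: t).map pvLen := fun hc => absurd (hle _ hc) (by omega)
          rw [List.map_append]
          simpa using PySem.List.index?_append_singleton_self _ _ hnotin
        · rw [hfold']; simp [pvStep, hgt]
      · refine ⟨m, k, ?_, ?_, ?_⟩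
        · rw [hmax']; congr 1; omega
        · rw [List.map_append]
          rw [PySem.List.index?_append_of_mem _ hmem] at *
          exact hidx
        · rw [hfold']; simp [pvStep, hgt]

-- ===== VERDICT (by name: the statement is the Claim_ definition above) =====
theorem get_max_seq_length_spec : Claim_equal_get_max_seq_length := by
  intro data _ hpre
  obtain ⟨m, k, hmax, hidx, hfold⟩ := pvFold_spec data hpre.1
  show get_max_seq_length data = get_max_seq_length_alt data
  simp only [get_max_seq_length, get_max_seq_length_alt, hmax, hidx, hfold]
  simp
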